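-- pv_equiv track=rewrite | github.com/ANTLab-polimi/v2x-xapp | setup/xapp-v2x/sl_slot_validation.py | get_next_valid_slot
-- ===== SOURCE A (Python) =====
-- from typing import List
--
-- _NUMEROLOGY = 2
--
-- def normalize_sfnsf(frame:int, subframe: int, slot: int, numerology: int = 2):
--     # get the normalized slot number
--     _normalized = int(slot)
--     _num_slot_per_subframe = pow(2, int(numerology))
--     _normalized += int(subframe)*_num_slot_per_subframe
--     _num_subframes_per_frame = 10
--     _normalized += int(frame)*_num_subframes_per_frame*_num_slot_per_subframe
--     return int(_normalized)
--
-- def is_sidelink_slot(final_bitmap: List[int], frame:int, subframe: int, slot: int, numerology: int = 2):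
--     _normalize_slot = normalize_sfnsf(frame, subframe, slot, numerology)
--     return final_bitmap[_normalize_slot%len(final_bitmap)]
--
-- def get_next_valid_slot(final_bitmap: List[int], frame: int, subframe: int, slot:int ):
--     _is_new_subframe = False
--     _is_new_frame = False
--     _is_valid_slot = False
--     _next_frame = frame
--     _next_subframe = subframe
--     _next_slot = slot
--     while(not _is_valid_slot):
--         _next_slot = (_next_slot + 1)%pow(2, _NUMEROLOGY)
--         _is_new_subframe = (_next_slot==0)
--         _next_subframe = (_next_subframe + (1 if _is_new_subframe else 0))%10
--         _is_new_frame = (_next_subframe == 0) & _is_new_subframe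
--         if _is_new_subframe:
--             _is_new_subframe = False
--
--         _next_frame = _next_frame + (1 if _is_new_frame else 0)
--         if _is_new_frame:
--             _is_new_frame = False
--         # stop to the next sidelink slot
--         _is_valid_slot = is_sidelink_slot(final_bitmap, _next_frame, _next_subframe, _next_slot, _NUMEROLOGY)
--     return _next_frame, _next_subframe, _next_slot
-- ===== SOURCE B (Python) =====
-- def _advance(frame, subframe, slot):
--     # normalized index (numerology 2) of the slot right after (frame, subframe, slot)
--     s = (slot + 1) % 4
--     carry = 1 if s == 0 else 0
--     sf = (subframe + carry) % 10
--     fr = frame + (1 if carry and sf == 0 else 0)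
--     return fr * 40 + sf * 4 + s
--
-- def get_next_valid_slot(final_bitmap, frame, subframe, slot):
--     n = _advance(frame, subframe, slot)
--     while not final_bitmap[n % len(final_bitmap)]:
--         n += 1
--     return n // 40, (n // 4) % 10, n % 4
-- ===== Notes on version B (the rewrite author's own statement) =====
-- stated objective: simpler
-- what changed: Replaces the carry-propagating triple of loop variables and new-subframe/new-frame flags by a single normalized slot counter: advance once to the next slot, then increment one integer until the bitmap entry at n % len is truthy, and decode n back to (frame, subframe, slot) positionally.
-- outside the precondition, e.g. on get_next_valid_slot([], 0, 0, 0): A raises ZeroDivisionError, B raises ZeroDivisionError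
import Mathlib
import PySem

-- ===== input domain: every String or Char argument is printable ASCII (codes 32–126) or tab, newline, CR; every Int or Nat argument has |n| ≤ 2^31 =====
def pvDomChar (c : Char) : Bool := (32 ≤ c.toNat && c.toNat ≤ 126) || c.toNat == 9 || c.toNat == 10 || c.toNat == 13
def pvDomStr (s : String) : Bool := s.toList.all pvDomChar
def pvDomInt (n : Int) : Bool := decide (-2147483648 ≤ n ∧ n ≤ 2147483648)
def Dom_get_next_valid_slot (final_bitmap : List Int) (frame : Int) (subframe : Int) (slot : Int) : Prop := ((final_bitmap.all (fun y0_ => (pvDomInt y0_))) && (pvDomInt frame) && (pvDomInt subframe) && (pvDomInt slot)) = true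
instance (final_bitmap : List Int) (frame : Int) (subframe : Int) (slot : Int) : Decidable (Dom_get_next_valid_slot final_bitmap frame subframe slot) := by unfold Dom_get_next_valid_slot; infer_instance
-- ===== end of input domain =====

-- B replaces A's carry-propagating (frame, subframe, slot) loop state and flags with one
-- normalized slot counter scanned forward and decoded positionally at the end (objective: simpler).
-- Both programs loop forever when no bitmap entry is truthy and raise on an empty bitmap;
-- Pre_ excludes exactly those inputs.

-- ===== PORT A =====
def normalize_sfnsf (frame : Int) (subframe : Int) (slot : Int) (numerology : Int) : Int :=
  let num_slot_per_subframe : Int := 2 ^ numerology.toNat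
  slot + subframe * num_slot_per_subframe + frame * 10 * num_slot_per_subframe

def is_sidelink_slot (final_bitmap : List Int) (frame : Int) (subframe : Int) (slot : Int) (numerology : Int) : Int :=
  let m := normalize_sfnsf frame subframe slot numerology
  -- final_bitmap[m % len(final_bitmap)]; index is in range whenever the list is nonempty,
  -- the empty list (Python ZeroDivisionError) is excluded by Pre_
  (PySem.List.pyGet? final_bitmap (PySem.Int.mod m final_bitmap.length)).getD 0

-- A's while loop; fuel = len(final_bitmap) suffices under Pre_ (the scanned normalized
-- indices cover every residue class mod len); fuel exhaustion is unreachable inside Pre_.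
def gnvsLoopA (final_bitmap : List Int) : Nat → Int → Int → Int → Int × Int × Int
  | 0, f, s, c => (f, s, c)
  | fuel + 1, f, s, c =>
      let c' := PySem.Int.mod (c + 1) 4
      let isNewSub := c' == 0
      let s' := PySem.Int.mod (s + (if isNewSub then (1 : Int) else 0)) 10
      let isNewFrame := (s' == 0) && isNewSub
      let f' := f + (if isNewFrame then (1 : Int) else 0)
      if is_sidelink_slot final_bitmap f' s' c' 2 ≠ 0 then (f', s', c')
      else gnvsLoopA final_bitmap fuel f' s' c'

def get_next_valid_slot (final_bitmap : List Int) (frame : Int) (subframe : Int) (slot : Int) : Int × Int × Int :=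
  gnvsLoopA final_bitmap final_bitmap.length frame subframe slot

-- ===== PORT B =====
-- _advance: normalized index (numerology 2) of the slot right after (frame, subframe, slot)
def gnvsAdvance (frame : Int) (subframe : Int) (slot : Int) : Int :=
  let s := PySem.Int.mod (slot + 1) 4
  let carry : Int := if s == 0 then 1 else 0
  let sf := PySem.Int.mod (subframe + carry) 10
  let fr := frame + (if (carry != 0) && (sf == 0) then (1 : Int) else 0)
  fr * 40 + sf * 4 + s

-- B's while loop: one integer counter; same fuel bound as A's loop
def gnvsScan (final_bitmap : List Int) : Nat → Int → Int
  | 0, n => n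
  | fuel + 1, n =>
      if (PySem.List.pyGet? final_bitmap (PySem.Int.mod n final_bitmap.length)).getD 0 ≠ 0 then n
      else gnvsScan final_bitmap fuel (n + 1)

def get_next_valid_slot_alt (final_bitmap : List Int) (frame : Int) (subframe : Int) (slot : Int) : Int × Int × Int :=
  let n := gnvsScan final_bitmap final_bitmap.length (gnvsAdvance frame subframe slot)
  (PySem.Int.floordiv n 40, PySem.Int.mod (PySem.Int.floordiv n 4) 10, PySem.Int.mod n 4)

-- ===== PRECONDITION & SPEC =====
-- Pre_ excludes the empty bitmap (A raises ZeroDivisionError) and all-falsy bitmaps (A loops forever).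
def Pre_get_next_valid_slot (final_bitmap : List Int) (frame : Int) (subframe : Int) (slot : Int) : Prop :=
  final_bitmap ≠ [] ∧ ∃ x ∈ final_bitmap, x ≠ 0

instance (final_bitmap : List Int) (frame : Int) (subframe : Int) (slot : Int) : Decidable (Pre_get_next_valid_slot final_bitmap frame subframe slot) := by unfold Pre_get_next_valid_slot; infer_instance

def pvWitness_get_next_valid_slot : List Int × Int × Int × Int := ([0, 1, 0], 5, 3, 2)

def Spec_get_next_valid_slot (final_bitmap : List Int) (frame : Int) (subframe : Int) (slot : Int) (out : Int × Int × Int) : Prop := out = get_next_valid_slot_alt final_bitmap frame subframe slot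
instance (final_bitmap : List Int) (frame : Int) (subframe : Int) (slot : Int) (out : Int × Int × Int) : Decidable (Spec_get_next_valid_slot final_bitmap frame subframe slot out) := by unfold Spec_get_next_valid_slot; infer_instance

-- ===== CLAIM (what is proved, stated in full; the proofs are below) =====
def Claim_equal_get_next_valid_slot : Prop := ∀ (final_bitmap : List Int) (frame : Int) (subframe : Int) (slot : Int), Dom_get_next_valid_slot final_bitmap frame subframe slot → Pre_get_next_valid_slot final_bitmap frame subframe slot → Spec_get_next_valid_slot final_bitmap frame subframe slot (get_next_valid_slot final_bitmap frame subframe slot)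

-- ===== LEMMAS AND PROOFS =====

-- the advance of a normalized state is the successor of its normalized index
lemma gnvsAdvance_succ (f s c : Int) (hc0 : 0 ≤ c) (hc : c < 4) (hs0 : 0 ≤ s) (hs : s < 10) :
    gnvsAdvance f s c = f * 40 + s * 4 + c + 1 := by
  unfold gnvsAdvance
  simp only [PySem.Int.mod_eq_emod_of_pos (show (0:Int) < 4 by norm_num),
    PySem.Int.mod_eq_emod_of_pos (show (0:Int) < 10 by norm_num),
    beq_iff_eq, bne_iff_ne, ne_eq, Bool.and_eq_true]
  split_ifs <;> omega

-- the components produced by one iteration of A's loop body encode to gnvsAdvance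
lemma stepA_encode (f s c : Int) :
    (f + (if ((PySem.Int.mod (s + (if ((PySem.Int.mod (c + 1) 4) == 0) then (1 : Int) else 0)) 10 == 0) && ((PySem.Int.mod (c + 1) 4) == 0)) then (1 : Int) else 0)) * 40
      + (PySem.Int.mod (s + (if ((PySem.Int.mod (c + 1) 4) == 0) then (1 : Int) else 0)) 10) * 4
      + (PySem.Int.mod (c + 1) 4) = gnvsAdvance f s c := by
  unfold gnvsAdvance
  simp only [beq_iff_eq, bne_iff_ne, ne_eq, Bool.and_eq_true]
  by_cases h : PySem.Int.mod (c + 1) 4 = 0 <;> simp [h] <;> split_ifs <;> simp_all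

-- decoding the normalized index of a normalized state recovers the state
lemma decode_encode (f s c : Int) (hc0 : 0 ≤ c) (hc : c < 4) (hs0 : 0 ≤ s) (hs : s < 10) :
    (PySem.Int.floordiv (f * 40 + s * 4 + c) 40,
     PySem.Int.mod (PySem.Int.floordiv (f * 40 + s * 4 + c) 4) 10,
     PySem.Int.mod (f * 40 + s * 4 + c) 4) = (f, s, c) := by
  rw [PySem.Int.floordiv_eq_ediv_of_pos (by norm_num),
      PySem.Int.floordiv_eq_ediv_of_pos (by norm_num),
      PySem.Int.mod_eq_emod_of_pos (by norm_num),
      PySem.Int.mod_eq_emod_of_pos (by norm_num)]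
  refine Prod.ext ?_ (Prod.ext ?_ ?_) <;> simp <;> omega

-- any nonzero entry yields a truthy scanned index within len steps of any start
lemma exists_valid_within (bm : List Int) (hne : bm ≠ []) (hx : ∃ x ∈ bm, x ≠ 0) (n : Int) :
    ∃ k : Nat, k < bm.length ∧
      (PySem.List.pyGet? bm (PySem.Int.mod (n + k) bm.length)).getD 0 ≠ 0 := by
  obtain ⟨x, hmem, hx0⟩ := hx
  obtain ⟨j, hj, rfl⟩ := List.mem_iff_getElem.mp hmem
  have hL : (0 : Int) < bm.length := by
    have := List.length_pos_iff.mpr hne; exact_mod_cast this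
  have h2 : (0 : Int) ≤ ((j : Int) - n) % (bm.length : Int) :=
    Int.emod_nonneg ((j : Int) - n) (by omega)
  refine ⟨((((j : Int) - n) % (bm.length : Int))).toNat, ?_, ?_⟩
  · have h1 : ((j : Int) - n) % (bm.length : Int) < (bm.length : Int) :=
      Int.emod_lt_of_pos ((j : Int) - n) hL
    omega
  · have hcast : (((((j : Int) - n) % (bm.length : Int))).toNat : Int)
        = ((j : Int) - n) % (bm.length : Int) := Int.toNat_of_nonneg h2
    rw [PySem.Int.mod_eq_emod_of_pos hL, hcast]
    have hidx : (n + ((j : Int) - n) % (bm.length : Int)) % (bm.length : Int) = (j : Int) := by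
      rw [Int.add_emod, Int.emod_emod_of_dvd _ dvd_rfl, ← Int.add_emod]
      have hjn : n + ((j : Int) - n) = (j : Int) := by ring
      rw [hjn, Int.emod_eq_of_lt (by omega) (by exact_mod_cast hj)]
    rw [hidx, PySem.List.pyGet?_natCast, List.getElem?_eq_getElem hj]
    simpa using hx0

-- main loop correspondence: A's loop from any state equals the decode of B's scan
-- from the advance of that state, provided a truthy index exists within the fuel
lemma loop_eq (bm : List Int) :
    ∀ (fuel : Nat) (f s c : Int),
      (∃ k : Nat, k < fuel ∧
        (PySem.List.pyGet? bm (PySem.Int.mod (gnvsAdvance f s c + k) bm.length)).getD 0 ≠ 0) →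
      gnvsLoopA bm fuel f s c =
        (PySem.Int.floordiv (gnvsScan bm fuel (gnvsAdvance f s c)) 40,
         PySem.Int.mod (PySem.Int.floordiv (gnvsScan bm fuel (gnvsAdvance f s c)) 4) 10,
         PySem.Int.mod (gnvsScan bm fuel (gnvsAdvance f s c)) 4) := by
  intro fuel
  induction fuel with
  | zero => intro f s c h; obtain ⟨k, hk, _⟩ := h; omega
  | succ fuel ih =>
    intro f s c hex
    set c' := PySem.Int.mod (c + 1) 4 with hc'
    set s' := PySem.Int.mod (s + (if (c' == 0) then (1 : Int) else 0)) 10 with hs'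
    set f' := f + (if ((s' == 0) && (c' == 0)) then (1 : Int) else 0) with hf'
    have henc : f' * 40 + s' * 4 + c' = gnvsAdvance f s c := stepA_encode f s c
    have hc'0 : 0 ≤ c' := PySem.Int.mod_nonneg _ (by norm_num)
    have hc'4 : c' < 4 := PySem.Int.mod_lt _ (by norm_num)
    have hs'0 : 0 ≤ s' := PySem.Int.mod_nonneg _ (by norm_num)
    have hs'10 : s' < 10 := PySem.Int.mod_lt _ (by norm_num)
    have hcheck : is_sidelink_slot bm f' s' c' 2 =
        (PySem.List.pyGet? bm (PySem.Int.mod (gnvsAdvance f s c) bm.length)).getD 0 := by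
      unfold is_sidelink_slot normalize_sfnsf
      have harg : c' + s' * 2 ^ (2 : Int).toNat + f' * 10 * 2 ^ (2 : Int).toNat
          = gnvsAdvance f s c := by
        rw [← henc]; simp only [show (2 : Int).toNat = 2 from rfl]; ring
      simp only [harg]
    show (if is_sidelink_slot bm f' s' c' 2 ≠ 0 then (f', s', c')
          else gnvsLoopA bm fuel f' s' c') = _
    rw [show gnvsScan bm (fuel + 1) (gnvsAdvance f s c) =
        (if (PySem.List.pyGet? bm (PySem.Int.mod (gnvsAdvance f s c) bm.length)).getD 0 ≠ 0
         then gnvsAdvance f s c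
         else gnvsScan bm fuel (gnvsAdvance f s c + 1)) from rfl]
    rw [hcheck]
    by_cases hv : (PySem.List.pyGet? bm (PySem.Int.mod (gnvsAdvance f s c) bm.length)).getD 0 ≠ 0
    · simp only [if_pos hv]
      rw [← henc]
      exact (decode_encode f' s' c' hc'0 hc'4 hs'0 hs'10).symm
    · simp only [if_neg hv]
      have hadv : gnvsAdvance f' s' c' = gnvsAdvance f s c + 1 := by
        rw [gnvsAdvance_succ f' s' c' hc'0 hc'4 hs'0 hs'10, henc]
      obtain ⟨k, hk, hkv⟩ := hex
      have hk0 : k ≠ 0 := by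
        rintro rfl; simp only [Nat.cast_zero, add_zero] at hkv; exact hv hkv
      have hex' : ∃ k' : Nat, k' < fuel ∧
          (PySem.List.pyGet? bm (PySem.Int.mod (gnvsAdvance f' s' c' + k') bm.length)).getD 0 ≠ 0 := by
        refine ⟨k - 1, by omega, ?_⟩
        rw [hadv]
        have : gnvsAdvance f s c + 1 + ((k - 1 : Nat) : Int) = gnvsAdvance f s c + (k : Int) := by
          have : ((k - 1 : Nat) : Int) = (k : Int) - 1 := by omega
          rw [this]; ring
        rw [this]; exact hkv
      have := ih f' s' c' hex'
      rw [hadv] at this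
      exact this

-- ===== VERDICT (by name: the statement is the Claim_ definition above) =====
theorem get_next_valid_slot_spec : Claim_equal_get_next_valid_slot := by
  intro bm frame subframe slot _ hpre
  obtain ⟨hne, hx⟩ := hpre
  unfold Spec_get_next_valid_slot get_next_valid_slot get_next_valid_slot_alt
  exact loop_eq bm bm.length frame subframe slot
    (exists_valid_within bm hne hx (gnvsAdvance frame subframe slot))
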